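-- pv_equiv track=rewrite | github.com/PogromcaPapai/Larch | app/FormalSystem/int_seqcal_swiss.py | is_sequent
-- ===== SOURCE A (Python) =====
-- def is_sequent(l, s) -> bool:
--     buffor = []
--     for i in l:
--         if i.startswith('sep_'):
--             if buffor == s:
--                 return True
--             else:
--                 buffor = []
--         else:
--             buffor.append(i)
--     return buffor == s
-- ===== SOURCE B (Python) =====
-- def is_sequent(l, s) -> bool:
--     # Occurrence search: s matches some segment iff s is separator-free and
--     # occurs contiguously in l flanked by separators (or the ends of l).
--     if any(x.startswith('sep_') for x in s):
--         return False
--     n = len(l)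
--     k = len(s)
--     for p in range(n - k + 1):
--         if ((p == 0 or l[p - 1].startswith('sep_'))
--                 and (p + k == n or l[p + k].startswith('sep_'))
--                 and l[p:p + k] == s):
--             return True
--     return False
-- ===== Notes on version B (the rewrite author's own statement) =====
-- stated objective: alternative
-- what changed: B never splits or accumulates segments: it rejects s if s contains a separator, and otherwise searches for a contiguous occurrence of s in l flanked on both sides by a separator or an end of l (pattern-occurrence search with boundary tests instead of A's streaming buffer comparison).
import Mathlib
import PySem

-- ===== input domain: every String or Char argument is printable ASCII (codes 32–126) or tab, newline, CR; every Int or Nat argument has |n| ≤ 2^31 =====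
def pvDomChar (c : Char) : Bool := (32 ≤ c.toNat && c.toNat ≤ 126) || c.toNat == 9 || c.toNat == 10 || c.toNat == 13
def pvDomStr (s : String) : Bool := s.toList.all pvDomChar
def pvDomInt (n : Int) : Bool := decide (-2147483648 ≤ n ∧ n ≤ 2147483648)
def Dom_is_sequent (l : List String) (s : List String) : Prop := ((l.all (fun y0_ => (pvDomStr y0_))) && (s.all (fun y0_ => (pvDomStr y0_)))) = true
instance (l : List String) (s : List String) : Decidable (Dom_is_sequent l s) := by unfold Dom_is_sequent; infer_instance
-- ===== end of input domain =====

-- B replaces A's streaming buffer-split by a pattern-occurrence search: s matches a segment iff s is separator-free and occurs contiguously in l flanked by separators or ends; alternative algorithm, similar cost.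


-- ===== PORT A =====
-- A's loop with early return, as structural recursion carrying the buffer.
def isSequentGo (l : List String) (s : List String) (buffor : List String) : Bool :=
  match l with
  | [] => buffor == s
  | i :: rest =>
    if PySem.Str.startswith i "sep_" then
      if buffor == s then true else isSequentGo rest s []
    else
      isSequentGo rest s (buffor ++ [i])

def is_sequent (l : List String) (s : List String) : Bool :=
  isSequentGo l s []

-- ===== PORT B =====
-- B: reject if s contains a separator, else scan positions p for an occurrence of s flanked by separators/ends.
def is_sequent_alt (l : List String) (s : List String) : Bool :=
  if s.any (fun x => PySem.Str.startswith x "sep_") then false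
  else
    (PySem.List.pyRange 0 ((l.length : Int) - (s.length : Int) + 1) 1).any (fun p =>
      ((p == 0) || PySem.Str.startswith (PySem.List.pyGetD l (p - 1) "") "sep_")
      && ((p + (s.length : Int) == (l.length : Int)) || PySem.Str.startswith (PySem.List.pyGetD l (p + (s.length : Int)) "") "sep_")
      && (PySem.List.slice l (some p) (some (p + (s.length : Int))) == s))

-- ===== PRECONDITION & SPEC =====
def Spec_is_sequent (l : List String) (s : List String) (out : Bool) : Prop := out = is_sequent_alt l s
instance (l : List String) (s : List String) (out : Bool) : Decidable (Spec_is_sequent l s out) := by unfold Spec_is_sequent; infer_instance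

-- ===== CLAIM (what is proved, stated in full; the proofs are below) =====
def Claim_equal_is_sequent : Prop := ∀ (l : List String) (s : List String), Dom_is_sequent l s → Spec_is_sequent l s (is_sequent l s)

-- ===== LEMMAS AND PROOFS =====

-- proof-side notions: separator-free lists, left/right boundary conditions, and
-- "s occurs in l as a full segment" as an append decomposition.
def SepFree (xs : List String) : Prop := ∀ x ∈ xs, PySem.Str.startswith x "sep_" = false
def LB (u : List String) : Prop := u = [] ∨ ∃ z, u.getLast? = some z ∧ PySem.Str.startswith z "sep_" = true
def RB (v : List String) : Prop := v = [] ∨ ∃ z, v.head? = some z ∧ PySem.Str.startswith z "sep_" = true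
def Decomp (l s : List String) : Prop := ∃ u v, l = u ++ s ++ v ∧ LB u ∧ RB v

theorem getLast?_take_eq (l : List String) (q : Nat) (h1 : 1 ≤ q) (h2 : q ≤ l.length) : (l.take q).getLast? = l[q-1]? := by
  rw [List.getLast?_eq_getElem?, List.getElem?_take_of_lt (by simp [Nat.min_eq_left h2]; omega)]
  congr 1
  simp [Nat.min_eq_left h2]

theorem main_go (s : List String) : ∀ (l buf : List String), SepFree buf →
    (isSequentGo l s buf = true ↔ (SepFree s ∧ Decomp (buf ++ l) s)) := by
  intro l
  induction l with
  | nil =>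
    intro buf hb
    simp only [isSequentGo, List.append_nil, beq_iff_eq]
    constructor
    · rintro rfl
      exact ⟨hb, [], [], by simp, Or.inl rfl, Or.inl rfl⟩
    · rintro ⟨hs, u, v, heq, hu, hv⟩
      have hu0 : u = [] := by
        rcases hu with h | ⟨z, hz, hzP⟩
        · exact h
        · have hzm : z ∈ buf := by
            rw [heq]
            exact List.mem_append_left _ (List.mem_append_left _ (List.mem_of_getLast? hz))
          rw [hb z hzm] at hzP
          exact absurd hzP Bool.false_ne_true
      have hv0 : v = [] := by
        rcases hv with h | ⟨z, hz, hzP⟩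
        · exact h
        · have hzm : z ∈ buf := by
            rw [heq]
            exact List.mem_append_right _ (List.mem_of_mem_head? hz)
          rw [hb z hzm] at hzP
          exact absurd hzP Bool.false_ne_true
      rw [heq, hu0, hv0]
      simp
  | cons x r ih =>
    intro buf hb
    by_cases hx : PySem.Str.startswith x "sep_" = true
    · rw [show isSequentGo (x :: r) s buf =
        (if buf == s then true else isSequentGo r s []) from by
          simp only [isSequentGo]; rw [if_pos hx]]
      constructor
      · intro h
        by_cases hbs : buf = s
        · subst hbs
          exact ⟨hb, [], x :: r, by simp, Or.inl rfl, Or.inr ⟨x, rfl, hx⟩⟩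
        · have h' : isSequentGo r s [] = true := by
            simpa [hbs] using h
          obtain ⟨hs, u', v', heq, hu', hv'⟩ := (ih [] (by intro z hz; cases hz)).mp h'
          simp only [List.nil_append] at heq
          refine ⟨hs, (buf ++ [x]) ++ u', v', ?_, ?_, hv'⟩
          · rw [heq]
            simp [List.append_assoc]
          · right
            cases u' with
            | nil => exact ⟨x, by simp, hx⟩
            | cons a t =>
              rcases hu' with h0 | ⟨z, hz, hzP⟩
              · cases h0
              · exact ⟨z, by rw [List.getLast?_append_of_ne_nil _ (by simp)]; exact hz, hzP⟩
      · rintro ⟨hs, u, v, heq, hu, hv⟩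
        have hlen : buf.length + 1 + r.length = u.length + s.length + v.length := by
          have := congrArg List.length heq
          simp at this
          omega
        by_cases h1 : buf.length < u.length
        · -- x lies inside u
          have hpre1 : (buf ++ [x]) <+: (buf ++ x :: r) := ⟨r, by simp⟩
          have hpre2 : u <+: (buf ++ x :: r) := ⟨s ++ v, by rw [heq]; simp [List.append_assoc]⟩
          obtain ⟨u', rfl⟩ := List.prefix_of_prefix_length_le hpre1 hpre2 (by simp; omega)
          have heqr : r = u' ++ s ++ v := by
            have h' := heq
            simp only [List.append_assoc, List.cons_append,
              List.append_cancel_left_eq, List.cons.injEq, List.nil_append] at h'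
            simpa [List.append_assoc] using h'.2
          have hu'' : LB u' := by
            cases u' with
            | nil => exact Or.inl rfl
            | cons a t =>
              rcases hu with h0 | ⟨z, hz, hzP⟩
              · simp at h0
              · exact Or.inr ⟨z, by rw [List.getLast?_append_of_ne_nil _ (by simp)] at hz; exact hz, hzP⟩
          have hgo : isSequentGo r s [] = true :=
            (ih [] (by intro z hz; cases hz)).mpr ⟨hs, u', v, by simpa using heqr, hu'', hv⟩
          by_cases hbs : buf = s <;> simp [hbs, hgo]
        · by_cases h2 : buf.length < u.length + s.length
          · -- x lies inside s: contradiction with SepFree s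
            have hx_at : (buf ++ x :: r)[buf.length]? = some x := by
              rw [List.getElem?_append_right (le_refl _)]
              simp
            rw [heq, List.append_assoc, List.getElem?_append_right (by omega),
              List.getElem?_append_left (by omega)] at hx_at
            have hxs : x ∈ s := List.mem_of_getElem? hx_at
            rw [hs x hxs] at hx
            exact absurd hx Bool.false_ne_true
          · -- u ++ s is a prefix of buf
            have hmu : u.length + s.length ≤ buf.length := by omega
            have hp1 : (u ++ s) <+: (buf ++ x :: r) := ⟨v, by rw [heq]⟩
            have hp2 : buf <+: (buf ++ x :: r) := ⟨x :: r, rfl⟩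
            have hups : (u ++ s) <+: buf := List.prefix_of_prefix_length_le hp1 hp2 (by simpa using hmu)
            have hu0 : u = [] := by
              rcases hu with h | ⟨z, hz, hzP⟩
              · exact h
              · have hzm : z ∈ buf :=
                  hups.subset (List.mem_append_left _ (List.mem_of_getLast? hz))
                rw [hb z hzm] at hzP
                exact absurd hzP Bool.false_ne_true
            subst hu0
            simp only [List.nil_append] at heq hups hmu hlen
            have hvne : v ≠ [] := by
              intro h0
              rw [h0] at hlen
              simp at hlen
              omega
            obtain ⟨z, hz, hzP⟩ := hv.resolve_left hvne
            by_cases hks : s.length = buf.length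
            · have hsb : s = buf := hups.eq_of_length (by omega)
              simp [hsb]
            · have hlt : s.length < buf.length := by omega
              have hzidx : (buf ++ x :: r)[s.length]? = some z := by
                rw [heq, List.getElem?_append_right (le_refl _)]
                simpa [← List.head?_eq_getElem?] using hz
              rw [List.getElem?_append_left hlt] at hzidx
              have hzm : z ∈ buf := List.mem_of_getElem? hzidx
              rw [hb z hzm] at hzP
              exact absurd hzP Bool.false_ne_true
    · have hx' : PySem.Str.startswith x "sep_" = false := by simpa using hx
      rw [show isSequentGo (x :: r) s buf = isSequentGo r s (buf ++ [x]) from by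
        simp only [isSequentGo]; rw [if_neg hx]]
      rw [show buf ++ x :: r = (buf ++ [x]) ++ r by simp]
      exact ih (buf ++ [x]) (by
        intro z hz
        rcases List.mem_append.mp hz with h | h
        · exact hb z h
        · rw [List.mem_singleton.mp h]; exact hx')

theorem bside (l s : List String) :
    (is_sequent_alt l s = true ↔ (SepFree s ∧ Decomp l s)) := by
  unfold is_sequent_alt
  by_cases hA : s.any (fun x => PySem.Str.startswith x "sep_") = true
  · simp only [hA, if_true, Bool.false_eq_true, false_iff, not_and]
    intro hs hd
    obtain ⟨x, hx, hP⟩ := List.any_eq_true.mp hA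
    rw [hs x hx] at hP
    exact Bool.false_ne_true hP
  · have hA' : (s.any fun x => PySem.Str.startswith x "sep_") = false := by simpa using hA
    have hs : SepFree s := by
      intro x hx
      by_contra h
      exact hA (List.any_eq_true.mpr ⟨x, hx, by simpa using h⟩)
    simp only [hA', if_false, List.any_eq_true, Bool.false_eq_true]
    constructor
    · rintro ⟨p, hp, hpred⟩
      rw [PySem.List.mem_pyRange_one] at hp
      obtain ⟨hp0, hpn⟩ := hp
      lift p to ℕ using hp0 with q
      have hk : q + s.length ≤ l.length := by omega
      simp only [Bool.and_eq_true, Bool.or_eq_true, beq_iff_eq] at hpred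
      obtain ⟨⟨hL, hR⟩, hW⟩ := hpred
      rw [PySem.List.slice_natCast_add] at hW
      refine ⟨hs, l.take q, l.drop (q + s.length), ?_, ?_, ?_⟩
      · conv_lhs => rw [← List.take_append_drop q l, ← List.take_append_drop s.length (l.drop q)]
        rw [hW, List.drop_drop]
        simp [List.append_assoc]
      · by_cases hq0 : q = 0
        · left; simp [hq0]
        · right
          rcases hL with h | h
          · exact absurd h (by simpa using hq0)
          · refine ⟨l[q-1]'(by omega), ?_, ?_⟩
            · exact (getLast?_take_eq l q (by omega) (by omega)).trans (List.getElem?_eq_getElem (by omega))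
            · rw [show ((q:Int) - 1) = (((q-1 : Nat)) : Int) by omega] at h
              rw [PySem.List.pyGetD_natCast] at h
              rwa [List.getD_eq_getElem l "" (by omega)] at h
      · by_cases hqn : q + s.length = l.length
        · left; simp [hqn]
        · right
          rcases hR with h | h
          · exact absurd h (by omega)
          · refine ⟨l[q+s.length]'(by omega), ?_, ?_⟩
            · rw [List.head?_drop]; exact List.getElem?_eq_getElem (by omega)
            · rw [show ((q:Int) + (s.length:Int)) = (((q + s.length : Nat)) : Int) by push_cast [Nat.cast_add]; ring] at h
              rw [PySem.List.pyGetD_natCast] at h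
              rwa [List.getD_eq_getElem l "" (by omega)] at h
    · rintro ⟨-, u, v, heq, hu, hv⟩
      have hlen : l.length = u.length + s.length + v.length := by simp [heq]; omega
      refine ⟨(u.length : Int), ?_, ?_⟩
      · rw [PySem.List.mem_pyRange_one]
        constructor
        · positivity
        · omega
      · simp only [Bool.and_eq_true, Bool.or_eq_true, beq_iff_eq]
        have hslice : PySem.List.slice l (some (u.length:Int)) (some ((u.length:Int)+(s.length:Int))) = s := by
          rw [PySem.List.slice_natCast_add, heq, List.append_assoc, List.drop_left, List.take_left]
        refine ⟨⟨?_, ?_⟩, hslice⟩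
        · rcases hu with h | ⟨z, hz, hzP⟩
          · left; simp [h]
          · right
            have hne : u ≠ [] := by rintro rfl; simp at hz
            have hu1 : 1 ≤ u.length := by cases u; simp at hne; simp
            rw [show ((u.length:Int) - 1) = (((u.length - 1 : Nat)) : Int) by omega,
              PySem.List.pyGetD_natCast]
            have hg : l[u.length - 1]? = some z := by
              rw [heq, List.append_assoc, List.getElem?_append_left (by omega),
                ← List.getLast?_eq_getElem?]
              exact hz
            rw [List.getD_eq_getElem?_getD, hg]
            exact hzP
        · rcases hv with h | ⟨z, hz, hzP⟩
          · left; rw [hlen]; push_cast; simp [h]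
          · right
            rw [show ((u.length:Int) + (s.length:Int)) = (((u.length + s.length : Nat)) : Int) by push_cast; ring,
              PySem.List.pyGetD_natCast]
            have hv0 : l[u.length + s.length]? = some z := by
              rw [heq, List.getElem?_append_right (by simp)]
              simpa [← List.head?_eq_getElem?] using hz
            rw [List.getD_eq_getElem?_getD, hv0]
            exact hzP

-- ===== VERDICT (by name: the statement is the Claim_ definition above) =====
theorem is_sequent_spec : Claim_equal_is_sequent := by
  intro l s _
  unfold Spec_is_sequent is_sequent
  rw [Bool.eq_iff_iff, bside]
  simpa using main_go s l [] (by intro x hx; cases hx)
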